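-- pv_equiv track=rewrite | github.com/jianjianh1/fastcc-benchmark | estimate_sparsity.py | linearize_row
-- ===== SOURCE A (Python) =====
-- def linearize_row(row, max_dims, contraction_dims):
--
-- 	#contraction dims is bitarray
-- 	#1 signals increment of contraction dim
--
-- 	#0 signals increment of non_contraction_dims
--
--
-- 	contraction_sum = 0
-- 	l_sum = 0
--
-- 	for i in range(len(row)):
--
-- 		if (contraction_dims[i]):
--
-- 			contraction_sum *= max_dims[i]
--
-- 			contraction_sum += row[i]
--
-- 		else:
--
-- 			l_sum *= max_dims[i]
-- 			l_sum += row[i]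
--
-- 	return [l_sum, contraction_sum]
-- ===== SOURCE B (Python) =====
-- def _horner(pairs):
--     acc = 0
--     for v, m in pairs:
--         acc = acc * m + v
--     return acc
--
--
-- def linearize_row(row, max_dims, contraction_dims):
--     triples = list(zip(row, max_dims, contraction_dims))
--     non = [(v, m) for (v, m, b) in triples if not b]
--     con = [(v, m) for (v, m, b) in triples if b]
--     return [_horner(non), _horner(con)]
-- ===== Notes on version B (the rewrite author's own statement) =====
-- stated objective: alternative
-- what changed: Replaced the single index loop that branches per element with: zip the three lists into triples, partition them into the non-contraction and contraction subsequences, and compute each output by an independent Horner fold (acc = acc*radix + value) over its subsequence.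
-- outside the precondition, e.g. on linearize_row([1], [], []): A raises IndexError, B returns [0, 0]
import Mathlib
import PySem

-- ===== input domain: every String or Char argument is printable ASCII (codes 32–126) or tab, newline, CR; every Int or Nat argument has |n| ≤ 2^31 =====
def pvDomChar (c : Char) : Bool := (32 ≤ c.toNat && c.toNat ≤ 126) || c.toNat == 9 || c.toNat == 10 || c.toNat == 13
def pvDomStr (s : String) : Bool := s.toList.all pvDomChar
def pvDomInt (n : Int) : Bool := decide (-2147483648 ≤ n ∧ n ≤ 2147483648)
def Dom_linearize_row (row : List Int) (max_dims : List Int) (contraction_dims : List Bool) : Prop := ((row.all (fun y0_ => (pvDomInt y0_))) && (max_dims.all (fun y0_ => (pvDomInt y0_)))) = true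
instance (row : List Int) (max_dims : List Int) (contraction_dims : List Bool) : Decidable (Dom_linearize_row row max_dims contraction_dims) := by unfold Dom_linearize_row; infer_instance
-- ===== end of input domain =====

-- B partitions the zipped (value, radix, bit) triples into the two subsequences and
-- reduces each by an independent Horner fold, instead of A's single branched index loop;
-- objective: alternative decomposition (same asymptotic cost).

-- ===== PORT A =====
def linearize_row (row : List Int) (max_dims : List Int) (contraction_dims : List Bool) : List Int :=
  -- for i in range(len(row)): branch on contraction_dims[i], update one of the two sums
  let s := (PySem.List.pyRange 0 row.length 1).foldl
    (fun (s : Int × Int) i =>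
      if PySem.List.pyGetD contraction_dims i false then
        (s.1, s.2 * PySem.List.pyGetD max_dims i 0 + PySem.List.pyGetD row i 0)
      else
        (s.1 * PySem.List.pyGetD max_dims i 0 + PySem.List.pyGetD row i 0, s.2))
    (0, 0)
  [s.1, s.2]

-- ===== PORT B =====
def lrHorner (pairs : List (Int × Int)) : Int :=
  pairs.foldl (fun acc p => acc * p.2 + p.1) 0

def linearize_row_alt (row : List Int) (max_dims : List Int) (contraction_dims : List Bool) : List Int :=
  let triples := row.zip (max_dims.zip contraction_dims)
  let non := (triples.filter (fun t => !t.2.2)).map (fun t => (t.1, t.2.1))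
  let con := (triples.filter (fun t => t.2.2)).map (fun t => (t.1, t.2.1))
  [lrHorner non, lrHorner con]

-- ===== PRECONDITION & SPEC =====
-- Pre_ excludes exactly the inputs where A raises IndexError: max_dims or contraction_dims
-- shorter than row.
def Pre_linearize_row (row : List Int) (max_dims : List Int) (contraction_dims : List Bool) : Prop :=
  row.length ≤ max_dims.length ∧ row.length ≤ contraction_dims.length
instance (row : List Int) (max_dims : List Int) (contraction_dims : List Bool) : Decidable (Pre_linearize_row row max_dims contraction_dims) := by unfold Pre_linearize_row; infer_instance

def pvWitness_linearize_row : List Int × List Int × List Bool := ([2, 3], [5, 7], [true, false])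

def Spec_linearize_row (row : List Int) (max_dims : List Int) (contraction_dims : List Bool) (out : List Int) : Prop := out = linearize_row_alt row max_dims contraction_dims
instance (row : List Int) (max_dims : List Int) (contraction_dims : List Bool) (out : List Int) : Decidable (Spec_linearize_row row max_dims contraction_dims out) := by unfold Spec_linearize_row; infer_instance

-- ===== CLAIM (what is proved, stated in full; the proofs are below) =====
def Claim_equal_linearize_row : Prop := ∀ (row : List Int) (max_dims : List Int) (contraction_dims : List Bool), Dom_linearize_row row max_dims contraction_dims → Pre_linearize_row row max_dims contraction_dims → Spec_linearize_row row max_dims contraction_dims (linearize_row row max_dims contraction_dims)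

-- ===== LEMMAS AND PROOFS =====

-- A's loop body over nat indices on the (still un-consumed) lists
def lrStep (rs ms : List Int) (cs : List Bool) (s : Int × Int) (k : Nat) : Int × Int :=
  if cs.getD k false then (s.1, s.2 * ms.getD k 0 + rs.getD k 0)
  else (s.1 * ms.getD k 0 + rs.getD k 0, s.2)

-- A's fold over pyRange is the nat-index fold with lrStep
lemma lr_fold_eq_natfold (rs ms : List Int) (cs : List Bool) :
    (PySem.List.pyRange 0 rs.length 1).foldl
      (fun (s : Int × Int) i =>
        if PySem.List.pyGetD cs i false then
          (s.1, s.2 * PySem.List.pyGetD ms i 0 + PySem.List.pyGetD rs i 0)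
        else
          (s.1 * PySem.List.pyGetD ms i 0 + PySem.List.pyGetD rs i 0, s.2)) (0, 0)
    = (List.range rs.length).foldl (lrStep rs ms cs) (0, 0) := by
  rw [PySem.List.pyRange_one]
  simp [List.foldl_map, PySem.List.pyGetD_natCast]
  rfl

-- the nat-index fold consumes the three lists in lockstep
lemma lr_natfold_cons (r : Int) (rs : List Int) (m : Int) (ms : List Int)
    (b : Bool) (cs : List Bool) (s : Int × Int) :
    (List.range (r :: rs).length).foldl (lrStep (r :: rs) (m :: ms) (b :: cs)) s
    = (List.range rs.length).foldl (lrStep rs ms cs) (lrStep (r :: rs) (m :: ms) (b :: cs) s 0) := by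
  simp only [List.length_cons, List.range_succ_eq_map, List.foldl_cons, List.foldl_map]
  rfl

-- the nat-index fold equals the branched fold over the zipped triples
lemma lr_natfold_eq_zipfold : ∀ (rs ms : List Int) (cs : List Bool) (l c : Int),
    rs.length ≤ ms.length → rs.length ≤ cs.length →
    (List.range rs.length).foldl (lrStep rs ms cs) (l, c)
    = (rs.zip (ms.zip cs)).foldl
        (fun (s : Int × Int) t =>
          if t.2.2 then (s.1, s.2 * t.2.1 + t.1) else (s.1 * t.2.1 + t.1, s.2)) (l, c) := by
  intro rs
  induction rs with
  | nil => intro ms cs l c _ _; simp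
  | cons r rs ih =>
    intro ms cs l c hm hc
    cases ms with
    | nil => simp at hm
    | cons m ms =>
      cases cs with
      | nil => simp at hc
      | cons b cs =>
        rw [lr_natfold_cons]
        simp only [List.length_cons, Nat.add_le_add_iff_right] at hm hc
        by_cases hb : b
        · simpa [lrStep, hb] using ih ms cs l (c * m + r) hm hc
        · simpa [lrStep, hb] using ih ms cs (l * m + r) c hm hc

-- the branched zip-fold splits into the two filtered Horner folds
lemma lr_split : ∀ (ts : List (Int × Int × Bool)) (l c : Int),
    ts.foldl (fun (s : Int × Int) t =>
        if t.2.2 then (s.1, s.2 * t.2.1 + t.1) else (s.1 * t.2.1 + t.1, s.2)) (l, c)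
    = (((ts.filter (fun t => !t.2.2)).map (fun t => (t.1, t.2.1))).foldl
         (fun acc p => acc * p.2 + p.1) l,
       ((ts.filter (fun t => t.2.2)).map (fun t => (t.1, t.2.1))).foldl
         (fun acc p => acc * p.2 + p.1) c) := by
  intro ts
  induction ts with
  | nil => intro l c; rfl
  | cons t ts ih =>
    intro l c
    by_cases hb : t.2.2
    · simp [hb, ih]
    · simp [hb, ih]

theorem linearize_row_spec : Claim_equal_linearize_row := by
  intro row max_dims contraction_dims _ hpre
  unfold Spec_linearize_row linearize_row linearize_row_alt lrHorner
  rw [lr_fold_eq_natfold, lr_natfold_eq_zipfold row max_dims contraction_dims 0 0 hpre.1 hpre.2,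
      lr_split]
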